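-- pv_equiv track=rewrite | github.com/Gruncan/donnchadh | scripts/generate_plot.py | mem_stat_string_builder
-- ===== SOURCE A (Python) =====
-- def mem_stat_string_builder(stats):
--     if stats is None or len(stats) == 0:
--         return ""
--     max_length = max(len(stat) for stat in stats)
--
--     sb = ""
--     for i, stat in enumerate(stats):
--         sb += f"{stat:<{max_length}}\t"
--
--         if (i + 1) % 4 == 0:
--             sb += "\n"
--     return sb
-- ===== SOURCE B (Python) =====
-- def mem_stat_string_builder(stats):
--     if not stats:
--         return ""
--     width = max(map(len, stats))
--
--     def row(chunk):
--         line = "".join(s.ljust(width) + "\t" for s in chunk)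
--         return line + "\n" if len(chunk) == 4 else line
--
--     return "".join(row(stats[start:start + 4])
--                    for start in range(0, len(stats), 4))
-- ===== Notes on version B (the rewrite author's own statement) =====
-- stated objective: alternative
-- what changed: Replaces A's flat accumulator loop with an (i+1)%4 counter by a row helper applied to four-element slices and a single ''.join over the rows (comprehension/join instead of a stateful loop).
import Mathlib
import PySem

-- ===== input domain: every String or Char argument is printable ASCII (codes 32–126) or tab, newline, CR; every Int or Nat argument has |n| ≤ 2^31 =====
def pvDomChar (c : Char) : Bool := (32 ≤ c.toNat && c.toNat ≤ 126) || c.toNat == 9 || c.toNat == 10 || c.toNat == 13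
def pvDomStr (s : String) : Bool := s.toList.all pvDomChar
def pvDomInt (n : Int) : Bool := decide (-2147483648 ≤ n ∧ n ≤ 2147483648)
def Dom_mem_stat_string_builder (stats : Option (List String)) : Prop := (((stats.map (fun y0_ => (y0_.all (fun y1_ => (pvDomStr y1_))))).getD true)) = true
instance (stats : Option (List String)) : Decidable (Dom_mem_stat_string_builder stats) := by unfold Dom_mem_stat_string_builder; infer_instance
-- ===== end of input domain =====

-- B replaces A's flat accumulator loop with an (i+1)%4 counter by a row helper
-- applied to four-element slices and one ''.join over the rows
-- (objective: alternative; same output, similar cost).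

-- ===== PORT A =====

-- f"{stat:<{w}}" / s.ljust(w) for a str: left-justify by padding with spaces to width w (exact)
def pyLjust (s : String) (w : Nat) : String :=
  s ++ String.ofList (List.replicate (w - s.length) ' ')

def mem_stat_string_builder (stats : Option (List String)) : String :=
  match stats with
  | none => ""
  | some l =>
    if l.length = 0 then ""
    else
      let maxLength := (l.map String.length).foldl max 0   -- max(len(stat) for stat in stats), l nonempty
      (PySem.List.enumerate l 0).foldl (fun sb p =>
        let sb := sb ++ pyLjust p.2 maxLength ++ "\t"
        if PySem.Int.mod (p.1 + 1) 4 == 0 then sb ++ "\n" else sb) ""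

-- ===== PORT B =====

-- the inner 'def row(chunk)': "".join(...) is PySem.Str.join ""
def pvRow (width : Nat) (chunk : List String) : String :=
  let line := PySem.Str.join "" (chunk.map (fun s => pyLjust s width ++ "\t"))
  if chunk.length == 4 then line ++ "\n" else line

def mem_stat_string_builder_alt (stats : Option (List String)) : String :=
  match stats with
  | none => ""
  | some l =>
    if l.isEmpty then ""
    else
      let width := (l.map String.length).foldl max 0   -- max(map(len, stats)), l nonempty
      PySem.Str.join "" ((PySem.List.pyRange 0 l.length 4).map
        (fun start => pvRow width (PySem.List.slice l (some start) (some (start + 4)))))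

-- ===== PRECONDITION & SPEC =====
def Spec_mem_stat_string_builder (stats : Option (List String)) (out : String) : Prop := out = mem_stat_string_builder_alt stats
instance (stats : Option (List String)) (out : String) : Decidable (Spec_mem_stat_string_builder stats out) := by unfold Spec_mem_stat_string_builder; infer_instance

-- ===== CLAIM (what is proved, stated in full; the proofs are below) =====
def Claim_equal_mem_stat_string_builder : Prop := ∀ (stats : Option (List String)), Dom_mem_stat_string_builder stats → Spec_mem_stat_string_builder stats (mem_stat_string_builder stats)

-- ===== LEMMAS AND PROOFS =====

-- proof-side reference shape: rows of (up to) four cells, '\n' after a full row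
def pvRows (m : Nat) (l : List String) : String :=
  match l with
  | [] => ""
  | x :: xs =>
    let c := (x :: xs).take 4
    (c.foldl (fun sb s => sb ++ pyLjust s m ++ "\t") "" ++
      (if c.length == 4 then "\n" else "")) ++ pvRows m ((x :: xs).drop 4)
termination_by l.length
decreasing_by simp

lemma pvRows_nil (m : Nat) : pvRows m [] = "" := by rw [pvRows]

lemma pvRows_cons (m : Nat) (x : String) (xs : List String) :
    pvRows m (x :: xs) =
      (((x :: xs).take 4).foldl (fun sb s => sb ++ pyLjust s m ++ "\t") "" ++
        (if ((x :: xs).take 4).length == 4 then "\n" else "")) ++ pvRows m ((x :: xs).drop 4) := by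
  rw [pvRows]

lemma string_foldl_cell_append (m : Nat) (c : List String) (sb : String) :
    c.foldl (fun sb s => sb ++ pyLjust s m ++ "\t") sb
      = sb ++ c.foldl (fun sb s => sb ++ pyLjust s m ++ "\t") "" := by
  induction c generalizing sb with
  | nil => simp
  | cons x xs ih =>
    simp only [List.foldl_cons]
    rw [ih (sb ++ pyLjust x m ++ "\t"), ih ("" ++ pyLjust x m ++ "\t")]
    simp [String.append_assoc]

lemma strJoin_empty_cons (a : String) (l : List String) :
    PySem.Str.join "" (a :: l) = a ++ PySem.Str.join "" l := by
  cases l with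
  | nil => simp [PySem.Str.join, PySem.Chars.join, List.intercalate]
  | cons b r =>
    simp [PySem.Str.join, PySem.Chars.join, List.intercalate, String.ofList_append]

-- "".join of the padded cells is the cell-by-cell fold A performs within a row
lemma join_cells (m : Nat) (c : List String) :
    PySem.Str.join "" (c.map (fun s => pyLjust s m ++ "\t"))
      = c.foldl (fun sb s => sb ++ pyLjust s m ++ "\t") "" := by
  induction c with
  | nil => rfl
  | cons x xs ih =>
    rw [List.map_cons, List.foldl_cons, string_foldl_cell_append, ← ih, strJoin_empty_cons]
    simp

lemma mod4_ne (k j : Int) (hk : k % 4 = 0) (hj : j = 1 ∨ j = 2 ∨ j = 3) :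
    ¬ ((PySem.Int.mod (k + j) 4 == 0) = true) := by
  simp only [PySem.Int.mod, Int.fmod_eq_emod, beq_iff_eq]
  omega

lemma mod4_eq (k : Int) (hk : k % 4 = 0) :
    (PySem.Int.mod (k + 3 + 1) 4 == 0) = true := by
  simp only [PySem.Int.mod, Int.fmod_eq_emod, beq_iff_eq]
  omega

-- A's enumerate-loop from an index divisible by 4 produces pvRows
lemma auxA_eq_rows (m : Nat) (l : List String) (k : Nat) (hk : k % 4 = 0) (sb : String) :
    (PySem.List.enumerate l (k : Int)).foldl (fun sb p =>
        let sb := sb ++ pyLjust p.2 m ++ "\t"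
        if PySem.Int.mod (p.1 + 1) 4 == 0 then sb ++ "\n" else sb) sb
      = sb ++ pvRows m l := by
  have hk' : (k : Int) % 4 = 0 := by omega
  match l with
  | [] => simp [PySem.List.enumerate_nil, pvRows_nil]
  | [a] =>
    simp only [PySem.List.enumerate_cons, PySem.List.enumerate_nil, List.foldl_cons, List.foldl_nil]
    rw [if_neg (mod4_ne _ 1 hk' (by omega)), pvRows_cons]
    simp [pvRows_nil, String.append_assoc]
  | [a, b] =>
    simp only [PySem.List.enumerate_cons, PySem.List.enumerate_nil, List.foldl_cons, List.foldl_nil]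
    rw [show (k : Int) + 1 + 1 = (k : Int) + 2 from by ring]
    rw [if_neg (mod4_ne _ 1 hk' (by omega)), if_neg (mod4_ne _ 2 hk' (by omega)), pvRows_cons]
    simp [pvRows_nil, String.append_assoc]
  | [a, b, c] =>
    simp only [PySem.List.enumerate_cons, PySem.List.enumerate_nil, List.foldl_cons, List.foldl_nil]
    rw [show (k : Int) + 1 + 1 = (k : Int) + 2 from by ring,
        show (k : Int) + 2 + 1 = (k : Int) + 3 from by ring]
    rw [if_neg (mod4_ne _ 1 hk' (by omega)), if_neg (mod4_ne _ 2 hk' (by omega)),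
        if_neg (mod4_ne _ 3 hk' (by omega)), pvRows_cons]
    simp [pvRows_nil, String.append_assoc]
  | a :: b :: c :: d :: rest =>
    simp only [PySem.List.enumerate_cons, List.foldl_cons]
    rw [show (k : Int) + 1 + 1 = (k : Int) + 2 from by ring,
        show (k : Int) + 2 + 1 = (k : Int) + 3 from by ring]
    rw [if_neg (mod4_ne _ 1 hk' (by omega)), if_neg (mod4_ne _ 2 hk' (by omega)),
        if_neg (mod4_ne _ 3 hk' (by omega)), if_pos (mod4_eq _ hk')]
    rw [show (k : Int) + 3 + 1 = ((k + 4 : Nat) : Int) from by push_cast; ring]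
    rw [auxA_eq_rows m rest (k + 4) (by omega)]
    rw [pvRows_cons]
    simp [String.append_assoc]
termination_by l.length
decreasing_by simp; omega

-- step-4 range cons
lemma pyRange4_cons (s n : Int) (h : s < n) :
    PySem.List.pyRange s n 4 = s :: PySem.List.pyRange (s + 4) n 4 := by
  rw [PySem.List.pyRange_of_pos s n (by norm_num), PySem.List.pyRange_of_pos (s + 4) n (by norm_num)]
  rw [if_pos h]
  have key : ((n - s + 4 - 1) / 4).toNat
      = (if s + 4 < n then ((n - (s + 4) + 4 - 1) / 4).toNat else 0) + 1 := by
    split_ifs with h2 <;> omega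
  rw [key, List.range_succ_eq_map, List.map_cons, List.map_map]
  refine congrArg₂ _ (by simp) ?_
  apply List.map_congr_left
  intro a _
  simp only [Function.comp_apply, Nat.succ_eq_add_one]
  push_cast
  ring

-- B's join of mapped rows from offset s produces pvRows of the suffix
lemma auxB_join_eq_rows (m : Nat) (l : List String) (s : Nat) :
    PySem.Str.join "" ((PySem.List.pyRange (s : Int) l.length 4).map
        (fun start => pvRow m (PySem.List.slice l (some start) (some (start + 4)))))
      = pvRows m (l.drop s) := by
  by_cases hs : s < l.length
  · rw [pyRange4_cons _ _ (by exact_mod_cast hs), List.map_cons, strJoin_empty_cons]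
    have hslice : PySem.List.slice l (some (s : Int)) (some ((s : Int) + 4))
        = (l.drop s).take 4 := by
      have := PySem.List.slice_natCast_add l s 4
      simpa using this
    rw [hslice]
    rw [show (s : Int) + 4 = ((s + 4 : Nat) : Int) by push_cast; ring]
    rw [auxB_join_eq_rows m l (s + 4)]
    obtain ⟨y, ys, hys⟩ : ∃ y ys, l.drop s = y :: ys := by
      cases hd : l.drop s with
      | nil => exact absurd (List.drop_eq_nil_iff.mp hd) (by omega)
      | cons y ys => exact ⟨y, ys, rfl⟩
    rw [show l.drop (s + 4) = (l.drop s).drop 4 by rw [List.drop_drop, Nat.add_comm]]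
    rw [hys, pvRows_cons, ← hys]
    unfold pvRow
    rw [join_cells]
    by_cases h4 : (((l.drop s).take 4).length == 4) = true
    · rw [if_pos h4, if_pos h4]
    · rw [if_neg h4, if_neg h4]
      simp [String.append_assoc]
  · have hd : l.drop s = [] := List.drop_eq_nil_iff.mpr (by omega)
    rw [PySem.List.pyRange_of_pos _ _ (by norm_num), if_neg (by exact_mod_cast hs)]
    simp [hd, pvRows_nil, PySem.Str.join, PySem.Chars.join, List.intercalate]
termination_by l.length - s
decreasing_by omega

-- ===== VERDICT (by name: the statement is the Claim_ definition above) =====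
theorem mem_stat_string_builder_spec : Claim_equal_mem_stat_string_builder := by
  intro stats _
  unfold Spec_mem_stat_string_builder mem_stat_string_builder mem_stat_string_builder_alt
  match stats with
  | none => rfl
  | some l =>
    cases l with
    | nil => rfl
    | cons x xs =>
      have h1 := auxA_eq_rows ((((x :: xs).map String.length).foldl max 0)) (x :: xs) 0 rfl ""
      have h2 := auxB_join_eq_rows ((((x :: xs).map String.length).foldl max 0)) (x :: xs) 0
      simp only [Nat.cast_zero, List.drop_zero] at h1 h2
      dsimp only
      rw [if_neg (by simp : ¬(x :: xs).length = 0)]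
      simp only [List.isEmpty_cons, Bool.false_eq_true, if_false]
      rw [h1, h2]
      simp
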